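-- pv_equiv track=rewrite | github.com/Guanwenqi/lanqiao | lesson6/位移.py | get
-- ===== SOURCE A (Python) =====
-- def get(a):
--     e,s=31,0
--     while(s<=e and (a>>e)&1==0):e-=1
--     while (s<=e and (a>>s)&1==0):s+=1
--     ans=''
--     for i in range(e,s-1,-1):
--         ans+=str((a>>i)&1)
--     return ans
-- ===== SOURCE B (Python) =====
-- def get(a):
--     return format(a & 0xFFFFFFFF, '032b').strip('0')
-- ===== Notes on version B (the rewrite author's own statement) =====
-- stated objective: idiomatic
-- what changed: Replaces A's two bit-scan while loops and the per-bit build loop with a single closed-form rendering: format(a & 0xFFFFFFFF, '032b').strip('0').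
import Mathlib
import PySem

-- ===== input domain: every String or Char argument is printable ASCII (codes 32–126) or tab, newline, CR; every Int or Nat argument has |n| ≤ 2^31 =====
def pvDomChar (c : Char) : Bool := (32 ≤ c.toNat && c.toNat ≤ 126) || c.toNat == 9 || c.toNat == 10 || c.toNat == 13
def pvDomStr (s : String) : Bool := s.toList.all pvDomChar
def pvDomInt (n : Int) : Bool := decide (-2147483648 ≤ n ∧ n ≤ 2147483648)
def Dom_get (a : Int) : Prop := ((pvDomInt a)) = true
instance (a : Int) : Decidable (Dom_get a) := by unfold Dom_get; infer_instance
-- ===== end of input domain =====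

-- B replaces A's three index loops by one closed-form formatting: format(a & 0xFFFFFFFF, '032b')
-- followed by strip('0') — objective: simpler/idiomatic (no speed claim).

-- ===== PORT A =====
-- first while loop: e decreases while s(=0) <= e and (a>>e)&1 == 0; fuel 33 covers e = 31..-1
def getLoopE (a : Int) (e : Int) : Nat → Int
  | 0 => e
  | f+1 => if 0 ≤ e ∧ PySem.Int.band (a >>> e.toNat) 1 = 0 then getLoopE a (e-1) f else e

-- second while loop: s increases while s <= e and (a>>s)&1 == 0; fuel 33 covers s = 0..e+1 ≤ 32
def getLoopS (a : Int) (eTop s : Int) : Nat → Int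
  | 0 => s
  | f+1 => if s ≤ eTop ∧ PySem.Int.band (a >>> s.toNat) 1 = 0 then getLoopS a eTop (s+1) f else s

def get (a : Int) : String :=
  let e := getLoopE a 31 33
  let s := getLoopS a e 0 33
  String.ofList ((PySem.List.pyRange e (s - 1) (-1)).foldl
    (fun ans i => ans ++ PySem.Int.toChars (PySem.Int.band (a >>> i.toNat) 1)) [])

-- ===== PORT B =====
-- format(m, '032b') for 0 ≤ m < 2^32 is format(m, 'b') left-padded with '0' to width 32,
-- i.e. PySem.Str.zfill (PySem.Int.toBin m) 32 (exact: m is nonnegative here, so no sign char)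
def get_alt (a : Int) : String :=
  PySem.Str.stripChars (PySem.Str.zfill (PySem.Int.toBin (PySem.Int.band a 4294967295)) 32) "0"

-- ===== PRECONDITION & SPEC =====
def Spec_get (a : Int) (out : String) : Prop := out = get_alt a
instance (a : Int) (out : String) : Decidable (Spec_get a out) := by unfold Spec_get; infer_instance

-- ===== CLAIM (what is proved, stated in full; the proofs are below) =====
def Claim_equal_get : Prop := ∀ (a : Int), Dom_get a → Spec_get a (get a)

-- ===== LEMMAS AND PROOFS =====

-- the low 32 bits of a, as a natural number (Python's a & 0xFFFFFFFF)
def maskN (a : Int) : Nat := (a % 4294967296).toNat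

-- bit i of the masked value, as the character A appends
def bitChar (n i : Nat) : Char := if (n / 2^i) % 2 = 1 then '1' else '0'

theorem mask_eq (a : Int) : PySem.Int.band a 4294967295 = a % 4294967296 := by
  have e1 : Int.toNat 4294967295 = 4294967295 := rfl
  unfold PySem.Int.band
  split
  · rw [if_pos (by norm_num)]
    have h := Nat.and_two_pow_sub_one_eq_mod a.toNat 32
    norm_num at h
    rw [e1, h]
    omega
  · rw [if_pos (by norm_num)]
    have h := Nat.and_two_pow_sub_one_eq_mod (-a-1).toNat 32
    norm_num at h
    rw [e1, Nat.and_comm, show ((-a-1).toNat) = (-a).toNat - 1 from by omega, h]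
    omega

theorem bit_eq (a : Int) (i : Nat) (hi : i < 32) :
    PySem.Int.band (a >>> i) 1 = ((maskN a / 2^i) % 2 : Nat) := by
  rw [PySem.Int.band_one, PySem.Int.mod_eq_emod_of_pos (by norm_num), Int.shiftRight_eq_div_pow]
  unfold maskN
  interval_cases i <;> norm_num <;> omega

theorem maskN_lt (a : Int) : maskN a < 4294967296 := by unfold maskN; omega

-- the pure-binary digit list behind Nat.toDigits 2 (MSB first)
def binList (n : Nat) : List Char :=
  if h : n < 2 then [(n % 2).digitChar] else binList (n / 2) ++ [(n % 2).digitChar]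
decreasing_by exact Nat.div_lt_self (by omega) (by omega)

theorem toDigitsCore_eq (f : Nat) : ∀ (n : Nat) (acc : List Char), n < f →
    Nat.toDigitsCore 2 f n acc = binList n ++ acc := by
  induction f with
  | zero => intro n acc h; omega
  | succ f ih =>
    intro n acc h
    rw [Nat.toDigitsCore]
    by_cases h2 : n / 2 = 0
    · rw [binList, dif_pos (by omega)]
      simp [h2]
    · simp only [h2]
      rw [ih (n/2) ((n % 2).digitChar :: acc) (by omega)]
      conv_rhs => rw [binList]
      rw [dif_neg (by omega)]
      simp

theorem toDigits_eq (n : Nat) : Nat.toDigits 2 n = binList n := by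
  have := toDigitsCore_eq (n+1) n [] (by omega)
  simpa [Nat.toDigits] using this

theorem binList_eq (n : Nat) (h : 0 < n) :
    binList n = ((List.range' 0 (Nat.log2 n + 1)).map (bitChar n)).reverse := by
  induction n using Nat.strong_induction_on with
  | _ n ih =>
    by_cases h2 : n < 2
    · have h1 : n = 1 := by omega
      subst h1
      rw [binList, dif_pos (by omega)]
      have : Nat.log2 1 = 0 := by rw [Nat.log2_def]; norm_num
      rw [this]
      simp only [List.range', List.map_cons, List.map_nil, List.reverse_cons, List.reverse_nil, List.nil_append]
      decide
    · rw [binList, dif_neg h2, ih (n/2) (Nat.div_lt_self (by omega) (by omega)) (by omega)]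
      have hlog : Nat.log2 n = Nat.log2 (n/2) + 1 := by
        rw [Nat.log2_def, if_pos (by omega)]
      have hbit : ∀ i : Nat, bitChar (n/2) i = bitChar n (i+1) := by
        intro i
        simp [bitChar, Nat.div_div_eq_div_mul, pow_succ, mul_comm]
      have hd : (n % 2).digitChar = bitChar n 0 := by
        unfold bitChar
        have : n % 2 = 0 ∨ n % 2 = 1 := by omega
        rcases this with h3 | h3 <;> simp [h3] <;> decide
      rw [hd, hlog]
      have hmap : (List.range' 0 (Nat.log2 (n/2) + 1)).map (bitChar (n/2))
          = (List.range' 1 (Nat.log2 (n/2) + 1)).map (bitChar n) := by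
        have := List.map_add_range' (a := 1) 0 (Nat.log2 (n/2) + 1) 1
        rw [← this, List.map_map]
        exact List.map_congr_left (fun i _ => by simpa [Nat.add_comm] using (hbit i))
      rw [hmap]
      have hr : List.range' 0 (Nat.log2 (n/2) + 1 + 1) = 0 :: List.range' 1 (Nat.log2 (n/2) + 1) := by
        rw [List.range'_succ]
      rw [hr]
      simp

-- zfill on a digit list with no sign character
theorem zfill_eq (cs : List Char) (c0 : Char) (rest : List Char) (hcs : cs = c0 :: rest)
    (h1 : c0 ≠ '+') (h2 : c0 ≠ '-') (hlen : cs.length ≤ 32) :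
    PySem.Chars.zfill cs 32 = List.replicate (32 - cs.length) '0' ++ cs := by
  unfold PySem.Chars.zfill
  by_cases h : (32:Int) ≤ (cs.length : Int)
  · rw [if_pos h]
    have : 32 - cs.length = 0 := by omega
    simp [this]
  · rw [if_neg h]
    subst hcs
    simp only []
    rw [if_neg (by simp [h1, h2])]
    have : ((32:Int)).toNat - (c0 :: rest).length = 32 - (c0 :: rest).length := by omega
    rw [this]

theorem dropWhile_replicate_append (p : Char → Bool) (k : Nat) (l : List Char)
    (hp : p '0' = true) :
    List.dropWhile p (List.replicate k '0' ++ l) = List.dropWhile p l := by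
  rw [List.dropWhile_append]
  have : List.dropWhile p (List.replicate k '0') = [] := by
    rw [List.dropWhile_eq_nil_iff]
    intro x hx
    rw [List.eq_of_mem_replicate hx]
    exact hp
  simp [this]

theorem dw_range' (p : Char → Bool) (bc : Nat → Char) (s m l : Nat)
    (hsl : s ≤ l) (hlm : l < s + m)
    (hzero : ∀ j, s ≤ j → j < l → p (bc j) = true) (hone : p (bc l) = false) :
    List.dropWhile p ((List.range' s m).map bc) = (List.range' l (s + m - l)).map bc := by
  have hsplit : List.range' s m = List.range' s (l - s) ++ List.range' l (m - (l - s)) := by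
    have h := List.range'_append (s := s) (m := l - s) (n := m - (l - s)) (step := 1)
    rw [show s + 1 * (l - s) = l from by omega, show l - s + (m - (l - s)) = m from by omega] at h
    exact h.symm
  rw [hsplit, List.map_append, List.dropWhile_append]
  have hnil : List.dropWhile p ((List.range' s (l - s)).map bc) = [] := by
    rw [List.dropWhile_eq_nil_iff]
    intro x hx
    obtain ⟨j, hj, rfl⟩ := List.mem_map.mp hx
    have := List.mem_range'_1.mp hj
    exact hzero j this.1 (by omega)
  rw [hnil]
  simp only [List.isEmpty_nil, if_true]
  rw [show m - (l - s) = s + m - l from by omega,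
      show s + m - l = (s + m - l - 1) + 1 from by omega,
      List.range'_succ, List.map_cons, List.dropWhile_cons, hone]
  simp

-- loop specifications ------------------------------------------------------
theorem loopE_spec (a : Int) : ∀ (f : Nat) (e : Int), -1 ≤ e → e ≤ 31 → e < f →
    -1 ≤ getLoopE a e f ∧ getLoopE a e f ≤ e ∧
    (∀ j : Nat, (j:Int) ≤ e → getLoopE a e f < (j:Int) → maskN a / 2^j % 2 = 0) ∧
    (0 ≤ getLoopE a e f → maskN a / 2^((getLoopE a e f).toNat) % 2 = 1) := by
  intro f
  induction f with
  | zero =>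
    intro e h1 h2 h3
    simp only [getLoopE]
    exact ⟨h1, le_refl e, fun j hj hlt => by omega, fun he => by omega⟩
  | succ f ih =>
    intro e h1 h2 h3
    rw [getLoopE]
    by_cases hc : 0 ≤ e ∧ PySem.Int.band (a >>> e.toNat) 1 = 0
    · rw [if_pos hc]
      obtain ⟨he, hb⟩ := hc
      have hbit : maskN a / 2^(e.toNat) % 2 = 0 := by
        have := bit_eq a e.toNat (by omega)
        rw [this] at hb
        exact_mod_cast hb
      obtain ⟨p1, p2, p3, p4⟩ := ih (e-1) (by omega) (by omega) (by omega)
      refine ⟨p1, by omega, ?_, p4⟩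
      intro j hj hlt
      by_cases hje : (j:Int) ≤ e - 1
      · exact p3 j hje hlt
      · have : (j:Int) = e := by omega
        have : j = e.toNat := by omega
        rw [this]
        exact hbit
    · rw [if_neg hc]
      refine ⟨h1, le_refl e, ?_, ?_⟩
      · intro j hj hlt; omega
      · intro he
        have hb : ¬ PySem.Int.band (a >>> e.toNat) 1 = 0 := by tauto
        have heq := bit_eq a e.toNat (by omega)
        rw [heq] at hb
        have : maskN a / 2^(e.toNat) % 2 = 0 ∨ maskN a / 2^(e.toNat) % 2 = 1 := by omega
        rcases this with h | h
        · exact absurd (by exact_mod_cast congrArg (Nat.cast : Nat → Int) h) hb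
        · exact h

theorem loopS_spec (a : Int) (eTop : Int) (heTop : eTop ≤ 31) :
    ∀ (f : Nat) (s : Int), 0 ≤ s → s ≤ eTop + 1 → eTop + 1 - s < f →
    s ≤ getLoopS a eTop s f ∧ getLoopS a eTop s f ≤ eTop + 1 ∧
    (∀ j : Nat, s ≤ (j:Int) → (j:Int) < getLoopS a eTop s f → maskN a / 2^j % 2 = 0) ∧
    (getLoopS a eTop s f ≤ eTop → maskN a / 2^((getLoopS a eTop s f).toNat) % 2 = 1) := by
  intro f
  induction f with
  | zero => intro s h1 h2 h3; exfalso; omega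
  | succ f ih =>
    intro s h1 h2 h3
    rw [getLoopS]
    by_cases hc : s ≤ eTop ∧ PySem.Int.band (a >>> s.toNat) 1 = 0
    · rw [if_pos hc]
      obtain ⟨hse, hb⟩ := hc
      have hbit : maskN a / 2^(s.toNat) % 2 = 0 := by
        have := bit_eq a s.toNat (by omega)
        rw [this] at hb
        exact_mod_cast hb
      obtain ⟨p1, p2, p3, p4⟩ := ih (s+1) (by omega) (by omega) (by omega)
      refine ⟨by omega, p2, ?_, p4⟩
      intro j hj hlt
      by_cases hjs : s + 1 ≤ (j:Int)
      · exact p3 j hjs hlt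
      · have : (j:Int) = s := by omega
        have : j = s.toNat := by omega
        rw [this]
        exact hbit
    · rw [if_neg hc]
      refine ⟨le_refl s, ?_, ?_, ?_⟩
      · by_cases h : s ≤ eTop
        · omega
        · omega
      · intro j hj hlt; omega
      · intro hse
        have hb : ¬ PySem.Int.band (a >>> s.toNat) 1 = 0 := by tauto
        have heq := bit_eq a s.toNat (by omega)
        rw [heq] at hb
        have : maskN a / 2^(s.toNat) % 2 = 0 ∨ maskN a / 2^(s.toNat) % 2 = 1 := by omega
        rcases this with h | h
        · exact absurd (by exact_mod_cast congrArg (Nat.cast : Nat → Int) h) hb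
        · exact h

-- the descending Python range as a reversed range'
theorem pyRange_desc (L l : Nat) (h : l ≤ L) :
    PySem.List.pyRange (L:Int) ((l:Int)-1) (-1) = ((List.range' l (L+1-l)).map (Nat.cast : Nat → Int)).reverse := by
  unfold PySem.List.pyRange
  rw [if_neg (by norm_num)]
  have hlt : ((l:Int) - 1 < (L:Int)) := by omega
  simp only [show ¬ (0:Int) < -1 from by norm_num, if_false, hlt]
  have hcount : (((L:Int) - ((l:Int)-1) + -(-1) - 1) / -(-1)).toNat = L + 1 - l := by
    norm_num
    omega
  rw [hcount]
  rw [← List.map_reverse, List.reverse_range', List.map_map]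
  simp only [if_pos trivial]
  apply List.map_congr_left
  intro k hk
  have hk' := List.mem_range.mp hk
  simp only [Function.comp]
  push_cast [show l + (L + 1 - l) - 1 - k = L - k from by omega]
  omega

theorem flat_eq (g : Int → List Char) (bc : Nat → Char) : ∀ (xs : List Nat),
    (∀ j ∈ xs, g ((j:Nat):Int) = [bc j]) →
    List.flatMap g (xs.map (Nat.cast : Nat → Int)) = xs.map bc := by
  intro xs
  induction xs with
  | nil => intro _; rfl
  | cons j xs ih =>
    intro hj
    simp only [List.map_cons, List.flatMap_cons]
    rw [ih (fun i hi => hj i (List.mem_cons_of_mem j hi)), hj j List.mem_cons_self]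
    rfl

-- all bits zero implies the masked value is zero
theorem eq_zero_of_bits_zero (n : Nat) (h : ∀ j, n / 2^j % 2 = 0) : n = 0 := by
  by_contra hn
  obtain ⟨i, hi⟩ := Nat.exists_testBit_of_ne_zero hn
  rw [Nat.testBit_eq_decide_div_mod_eq] at hi
  have := of_decide_eq_true hi
  have := h i
  omega

-- the main equivalence, proved without any domain restriction
set_option maxHeartbeats 1000000 in
theorem get_eq_get_alt (a : Int) : get a = get_alt a := by
  have hn32 : maskN a < 4294967296 := maskN_lt a
  have hMn : a % 4294967296 = (maskN a : Int) := by unfold maskN; omega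
  -- loop results and their properties
  obtain ⟨pe1, pe2, pe3, pe4⟩ := loopE_spec a 33 31 (by norm_num) (by norm_num) (by norm_num)
  obtain ⟨ps1, ps2, ps3, ps4⟩ :=
    loopS_spec a (getLoopE a 31 33) (by exact le_trans pe2 (by norm_num)) 33 0
      (by norm_num) (by omega) (by omega)
  set n := maskN a with hn
  set E := getLoopE a 31 33 with hE
  set S := getLoopS a E 0 33 with hS
  -- B's list, reduced to strip-of-binary-digits
  have htb : (PySem.Int.toBin (PySem.Int.band a 4294967295)).toList = Nat.toDigits 2 n := by
    rw [PySem.Int.toList_toBin]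
    unfold PySem.Int.toBinChars
    rw [if_neg (by rw [mask_eq]; omega), mask_eq]
    rw [show (a % 4294967296).toNat = n from by rw [hn]; rfl]
  have harg : (PySem.Str.zfill (PySem.Int.toBin (PySem.Int.band a 4294967295)) 32).toList
      = PySem.Chars.zfill (Nat.toDigits 2 n) 32 := by
    simp only [PySem.Str.zfill, String.toList_ofList]
    rw [htb]
  have hB : (get_alt a).toList
      = PySem.Chars.stripChars (PySem.Chars.zfill (Nat.toDigits 2 n) 32) ['0'] := by
    unfold get_alt
    rw [PySem.Str.toList_stripChars, show ("0".toList) = ['0'] from rfl, harg]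
  -- conclude from a list-level equality
  suffices h : get a = String.ofList ((get_alt a).toList) by
    rw [h, String.ofList_toList]
  unfold _root_.get
  simp only [← hE, ← hS]
  refine congrArg String.ofList ?_
  by_cases hn0 : n = 0
  -- all 32 bits are zero: both sides give the empty string
  · have hallz : ∀ j : Nat, n / 2^j % 2 = 0 := by intro j; rw [hn0]; simp
    have hEneg : E < 0 := by
      by_contra h
      have := pe4 (by omega)
      rw [hallz E.toNat] at this
      omega
    have hE1 : E = -1 := by omega
    have hS0 : S = 0 := by
      have := ps2
      omega
    have hpr : PySem.List.pyRange (-1) ((0:Int) - 1) (-1) = [] := by decide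
    rw [hE1, hS0, hpr, List.foldl_nil, hB, hn0]
    decide
  -- n > 0 : both sides are the bits from the highest down to the lowest set bit
  · have hne : n ≠ 0 := hn0
    set L := Nat.log2 n with hL
    have hL31 : L ≤ 31 := by
      by_contra h
      have h32 : (2:Nat)^32 ≤ n := (Nat.le_log2 hne).mp (by omega)
      norm_num at h32
      omega
    have hbitL : n / 2^L % 2 = 1 := by
      have h1 : 2^L ≤ n := Nat.log2_self_le hne
      have h2 : n < 2^(L+1) := Nat.lt_log2_self
      have hd : n / 2^L = 1 := Nat.div_eq_of_lt_le (by omega) (by rw [pow_succ] at h2; omega)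
      rw [hd]
    have hhigh : ∀ j : Nat, L < j → n / 2^j % 2 = 0 := by
      intro j hj
      have h2 : n < 2^(L+1) := Nat.lt_log2_self
      have : n < 2^j := lt_of_lt_of_le h2 (Nat.pow_le_pow_right (by omega) (by omega))
      rw [Nat.div_eq_of_lt this]
    have hEL : E = (L:Int) := by
      have hge : (L:Int) ≤ E := by
        by_contra h
        have := pe3 L (by exact_mod_cast Int.ofNat_le.mpr hL31) (by omega)
        omega
      have hle : E ≤ (L:Int) := by
        by_contra h
        have h0E : 0 ≤ E := by omega
        have hb := pe4 h0E
        have : L < E.toNat := by omega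
        have := hhigh E.toNat this
        omega
      omega
    have hSE : S ≤ E := by
      by_contra h
      have hS1 : S = E + 1 := by omega
      apply hne
      apply eq_zero_of_bits_zero
      intro j
      by_cases hj : (j:Int) < S
      · exact ps3 j (by omega) hj
      · by_cases hj31 : j ≤ 31
        · exact pe3 j (by omega) (by omega)
        · exact hhigh j (by omega)
    set l := S.toNat with hl
    have hSl : S = (l:Int) := by omega
    have hbitl : n / 2^l % 2 = 1 := ps4 hSE
    have hlow : ∀ j : Nat, j < l → n / 2^j % 2 = 0 := by
      intro j hj
      exact ps3 j (by omega) (by omega)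
    have hlL : l ≤ L := by omega
    -- the character at each position, and the strip predicate on it
    have hpz : ∀ j : Nat, j < l → (['0'].contains (bitChar n j)) = true := by
      intro j hj
      unfold bitChar
      rw [hlow j hj]
      rfl
    have hpl : (['0'].contains (bitChar n l)) = false := by
      unfold bitChar
      rw [hbitl]
      rfl
    have hpL : (['0'].contains (bitChar n L)) = false := by
      unfold bitChar
      rw [hbitL]
      rfl
    -- A's side: the built list is the bits L down to l
    rw [hEL, hSl, pyRange_desc L l hlL, ← List.map_reverse,
        PySem.List.foldl_append_eq_flatMap, List.nil_append]
    rw [flat_eq _ (bitChar n) ((List.range' l (L+1-l)).reverse) ?hg]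
    case hg =>
      intro j hj
      have hj31 : j < 32 := by
        rw [List.mem_reverse, List.mem_range'_1] at hj
        omega
      simp only [Int.toNat_natCast]
      rw [Int.shiftRight_natCast_right, bit_eq a j hj31, ← hn]
      have : n / 2^j % 2 = 0 ∨ n / 2^j % 2 = 1 := by omega
      unfold bitChar
      rcases this with h | h <;> rw [h] <;> rfl
    -- B's side reduces to the same list
    rw [hB, toDigits_eq, binList_eq n (by omega)]
    have hlen : ((List.range' 0 (L+1)).map (bitChar n)).reverse.length = L + 1 := by simp
    have hhead : ((List.range' 0 (L+1)).map (bitChar n)).reverse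
        = bitChar n L :: ((List.range' 0 L).map (bitChar n)).reverse := by
      rw [List.range'_concat]
      simp
    rw [zfill_eq _ (bitChar n L) (((List.range' 0 L).map (bitChar n)).reverse) hhead
        (by unfold bitChar; split <;> decide) (by unfold bitChar; split <;> decide)
        (by rw [hlen]; omega)]
    simp only [PySem.Chars.stripChars]
    rw [dropWhile_replicate_append _ _ _ rfl]
    rw [show List.dropWhile (fun c => (['0'].contains c))
          (((List.range' 0 (L+1)).map (bitChar n)).reverse)
        = ((List.range' 0 (L+1)).map (bitChar n)).reverse from by
      rw [hhead, List.dropWhile_cons, hpL]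
      simp]
    rw [List.reverse_reverse]
    rw [dw_range' _ (bitChar n) 0 (L+1) l (by omega) (by omega)
        (fun j _ hj => hpz j hj) hpl]
    rw [List.map_reverse]
    norm_num

-- ===== VERDICT (by name: the statement is the Claim_ definition above) =====
theorem get_spec : Claim_equal_get := by
  intro a _
  unfold Spec_get
  exact get_eq_get_alt a
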